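-- pv_equiv track=rewrite | github.com/krzychusan/TestHard | mydevenv/lib/python2.6/site-packages/WebHelpers-0.6.4-py2.6.egg/webhelpers/containers.py | except_keys
-- ===== SOURCE A (Python) =====
-- def except_keys(dic, keys):
--     """Return a copy of the dict without the specified keys.
--
--     >>> except_keys({"A": 1, "B": 2, "C": 3}, ["A", "C"])
--     {'B': 2}
--     """
--     ret = dic.copy()
--     for key in keys:
--         try:
--             del ret[key]
--         except KeyError:
--             pass
--     return ret
-- ===== SOURCE B (Python) =====
-- def except_keys(dic, keys):
--     """Return a copy of the dict without the specified keys."""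
--     excluded = frozenset(keys)
--     out = {}
--     for k, v in dic.items():
--         if k not in excluded:
--             out[k] = v
--     return out
-- ===== Notes on version B (the rewrite author's own statement) =====
-- stated objective: idiomatic
-- what changed: B builds the result dict positively in a single pass over dic.items(), inserting only keys absent from a precomputed frozenset, instead of copying the whole dict and then deleting each key under try/except (no full copy, no exception handling per key).
import Mathlib
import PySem

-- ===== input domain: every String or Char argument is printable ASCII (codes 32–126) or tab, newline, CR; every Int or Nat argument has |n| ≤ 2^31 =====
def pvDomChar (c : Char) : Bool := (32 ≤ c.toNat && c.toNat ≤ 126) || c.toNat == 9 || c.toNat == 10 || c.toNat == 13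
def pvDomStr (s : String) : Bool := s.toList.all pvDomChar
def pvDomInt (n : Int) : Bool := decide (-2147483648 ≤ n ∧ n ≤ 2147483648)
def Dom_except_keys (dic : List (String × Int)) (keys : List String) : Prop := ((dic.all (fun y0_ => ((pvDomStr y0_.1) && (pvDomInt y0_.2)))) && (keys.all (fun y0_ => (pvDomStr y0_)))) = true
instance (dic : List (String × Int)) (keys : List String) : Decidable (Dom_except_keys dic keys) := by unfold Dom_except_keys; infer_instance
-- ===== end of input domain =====

-- B replaces A's copy-then-delete loop (with try/except) by one positive pass over
-- dic.items() that inserts into a fresh dict only the keys absent from a precomputed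
-- frozenset — more idiomatic, same cost.

-- ===== PORT A =====
-- ret = dic.copy(); for key in keys: try del ret[key] except KeyError: pass; return ret
-- (del on a missing key raises KeyError, which is caught and ignored: Dict.erase is a no-op there)
def except_keys (dic : List (String × Int)) (keys : List String) : List (String × Int) :=
  (keys.foldl (fun ret key => ret.erase key) (PySem.Dict.mk dic)).items

-- ===== PORT B =====
-- excluded = frozenset(keys); out = {}; for k, v in dic.items(): if k not in excluded: out[k] = v
-- out starts empty and the keys of dic.items() are distinct in Python, so each
-- executed `out[k] = v` appends a fresh pair: the loop is this structural recursion
-- emitting the kept pairs in order.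
def exceptKeysLoop (excluded : PySem.Set String) : List (String × Int) → List (String × Int)
  | [] => []
  | (k, v) :: rest =>
      if excluded.contains k then exceptKeysLoop excluded rest
      else (k, v) :: exceptKeysLoop excluded rest

def except_keys_alt (dic : List (String × Int)) (keys : List String) : List (String × Int) :=
  exceptKeysLoop (PySem.Set.ofList keys) dic

-- ===== PRECONDITION & SPEC =====
def Spec_except_keys (dic : List (String × Int)) (keys : List String) (out : List (String × Int)) : Prop := out = except_keys_alt dic keys
instance (dic : List (String × Int)) (keys : List String) (out : List (String × Int)) : Decidable (Spec_except_keys dic keys out) := by unfold Spec_except_keys; infer_instance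

-- ===== CLAIM (what is proved, stated in full; the proofs are below) =====
def Claim_equal_except_keys : Prop := ∀ (dic : List (String × Int)) (keys : List String), Dom_except_keys dic keys → Spec_except_keys dic keys (except_keys dic keys)

-- ===== LEMMAS AND PROOFS =====

-- A's fold of per-key erases applied to a dict = one filter of its items by non-membership in `keys`
lemma foldl_erase_items (keys : List String) (d : PySem.Dict String Int) :
    (keys.foldl (fun ret key => ret.erase key) d).items
      = d.items.filter (fun p => !(keys.contains p.1)) := by
  induction keys generalizing d with
  | nil => simp
  | cons k ks ih =>
      rw [List.foldl_cons, ih]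
      simp only [PySem.Dict.erase]
      rw [List.filter_filter]
      refine List.filter_congr (fun p _ => ?_)
      simp only [List.contains_cons, Bool.not_or, Bool.and_comm]

-- B's recursion is the same filter, over membership in the exclusion set
lemma exceptKeysLoop_eq_filter (ex : PySem.Set String) (l : List (String × Int)) :
    exceptKeysLoop ex l = l.filter (fun p => !(ex.contains p.1)) := by
  induction l with
  | nil => rfl
  | cons p rest ih =>
      obtain ⟨k, v⟩ := p
      rw [exceptKeysLoop, ih, List.filter_cons]
      by_cases h : k ∈ ex
      · simp [h]
      · simp [h]

-- ===== VERDICT (by name: the statement is the Claim_ definition above) =====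
theorem except_keys_spec : Claim_equal_except_keys := by
  intro dic keys _
  unfold Spec_except_keys except_keys except_keys_alt
  rw [foldl_erase_items, exceptKeysLoop_eq_filter]
  refine List.filter_congr (fun p _ => ?_)
  simp [PySem.Set.mem_ofList]
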